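-- pv_equiv track=rewrite | github.com/chaohungwu/Wehelp_stage1 | week2/week2_work.py | find
-- ===== SOURCE A (Python) =====
-- def find(spaces, stat, n): # your code here
--     """
--     spaces: 剩下的位置(list)
--     stat: 可不可以進入該車廂(list)
--     n: 有幾個客人(int)
--     """
--     carriage = ""
--     pool = []#候選池(index)
--
--     for i in range(len(stat)):
--
--         if stat[i]==1:#該車廂可以進入
--             #看該車廂剩下的座位夠不夠坐
--             if spaces[i]>=n:
--                 pool.append(i)
--             else:
--                 pass
--         else:
--             pass
--
--
--     if pool != []:
--         compare = [] #用來比較選出最小值(剩餘車位數)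
--         for i2 in range(len(pool)):
--             compare.append(spaces[pool[i2]])
--
--         carriage = pool[compare.index(min(compare))]
--
--     #如果車廂都沒有座位
--     else:
--         carriage = -1
--
--
--     return carriage
-- ===== SOURCE B (Python) =====
-- def find(spaces, stat, n):
--     best_idx = -1
--     best_space = None
--     for i in range(len(stat)):
--         if stat[i] == 1 and spaces[i] >= n:
--             if best_idx == -1 or spaces[i] < best_space:
--                 best_idx = i
--                 best_space = spaces[i]
--     return best_idx
-- ===== Notes on version B (the rewrite author's own statement) =====
-- stated objective: simpler
-- what changed: Replaces A's three-pass scheme (build a pool of eligible indices, build a parallel list of their space counts, then pick pool[compare.index(min(compare))]) with one linear scan keeping a running best index and best space, using strict '<' so ties keep the first qualifying carriage.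
import Mathlib
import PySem

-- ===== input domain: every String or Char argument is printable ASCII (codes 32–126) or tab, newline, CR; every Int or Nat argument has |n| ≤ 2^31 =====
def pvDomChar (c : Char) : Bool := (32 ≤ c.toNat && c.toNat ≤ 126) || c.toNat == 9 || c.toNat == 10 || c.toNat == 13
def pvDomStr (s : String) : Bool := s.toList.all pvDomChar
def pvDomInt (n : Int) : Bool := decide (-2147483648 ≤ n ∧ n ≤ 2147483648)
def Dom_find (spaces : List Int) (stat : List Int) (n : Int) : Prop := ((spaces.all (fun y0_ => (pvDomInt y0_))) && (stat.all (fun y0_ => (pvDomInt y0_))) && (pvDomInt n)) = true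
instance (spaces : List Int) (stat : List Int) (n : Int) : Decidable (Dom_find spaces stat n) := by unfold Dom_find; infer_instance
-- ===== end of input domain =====

-- B is a single linear scan (running best index / best space) instead of A's pool + compare-list
-- + index(min) selection; equal return value on all inputs where the Python A returns (Pre_).

-- ===== PORT A =====
def find (spaces : List Int) (stat : List Int) (n : Int) : Int :=
  let pool : List Int :=
    (PySem.List.pyRange 0 (PySem.List.len stat)).foldl
      (fun pool i =>
        if (PySem.List.pyGet? stat i).getD 0 = 1 then
          if (PySem.List.pyGet? spaces i).getD 0 ≥ n then pool ++ [i] else pool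
        else pool) []
  if pool ≠ [] then
    let compare : List Int :=
      (PySem.List.pyRange 0 (PySem.List.len pool)).foldl
        (fun c i2 => c ++ [(PySem.List.pyGet? spaces ((PySem.List.pyGet? pool i2).getD 0)).getD 0]) []
    (PySem.List.pyGet? pool
      ((((PySem.List.index? compare ((PySem.List.min? compare (fun y => y)).getD 0)).getD 0 : Nat)) : Int)).getD 0
  else -1

-- ===== PORT B =====
def find_alt (spaces : List Int) (stat : List Int) (n : Int) : Int :=
  let st : Int × Option Int :=
    (PySem.List.pyRange 0 (PySem.List.len stat)).foldl
      (fun (st : Int × Option Int) i =>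
        if (PySem.List.pyGet? stat i).getD 0 = 1 ∧ (PySem.List.pyGet? spaces i).getD 0 ≥ n then
          if st.1 = -1 ∨ (PySem.List.pyGet? spaces i).getD 0 < st.2.getD 0 then
            (i, some ((PySem.List.pyGet? spaces i).getD 0))
          else st
        else st) (-1, none)
  st.1

-- ===== PRECONDITION & SPEC =====
-- Pre_ excludes exactly the inputs where the Python A raises IndexError: an index i with
-- stat[i] == 1 but i out of range of spaces (B raises there too).
def Pre_find (spaces : List Int) (stat : List Int) (n : Int) : Prop :=
  ∀ i ∈ List.range stat.length, stat.getD i 0 = 1 → i < spaces.length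
instance (spaces : List Int) (stat : List Int) (n : Int) : Decidable (Pre_find spaces stat n) := by
  unfold Pre_find; infer_instance
def pvWitness_find : List Int × List Int × Int := ([3, 5, 4], [1, 0, 1], 2)

def Spec_find (spaces : List Int) (stat : List Int) (n : Int) (out : Int) : Prop := out = find_alt spaces stat n
instance (spaces : List Int) (stat : List Int) (n : Int) (out : Int) : Decidable (Spec_find spaces stat n out) := by unfold Spec_find; infer_instance

-- ===== CLAIM (what is proved, stated in full; the proofs are below) =====
def Claim_equal_find : Prop := ∀ (spaces : List Int) (stat : List Int) (n : Int), Dom_find spaces stat n → Pre_find spaces stat n → Spec_find spaces stat n (find spaces stat n)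

-- ===== LEMMAS AND PROOFS =====

-- A's selection from a candidate list q: the candidate at the first position of the minimum
-- of the compare list q.map g (with -1 for the empty pool).
def asel (g : Int → Int) (q : List Int) : Int :=
  if q = [] then -1
  else (PySem.List.pyGet? q
    ((((PySem.List.index? (q.map g) ((PySem.List.min? (q.map g) (fun y => y)).getD 0)).getD 0 : Nat)) : Int)).getD 0

theorem min?_append_singleton (c : List Int) (v : Int) :
    PySem.List.min? (c ++ [v]) (fun y => y) =
      some (match PySem.List.min? c (fun y => y) with
            | none => v
            | some m => if v < m then v else m) := by
  cases h : PySem.List.min? c (fun y => y) with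
  | none =>
    have hc : c = [] := (PySem.List.min?_eq_none_iff _ _).mp h
    subst hc; simp [PySem.List.min?]
  | some m =>
    unfold PySem.List.min? at h ⊢
    rw [List.foldl_append, h]
    by_cases h2 : v < m <;> simp [h2]

theorem asel_nil (g : Int → Int) : asel g [] = -1 := by simp [asel]

theorem asel_singleton (g : Int → Int) (j : Int) : asel g [j] = j := by
  simp [asel, PySem.List.min?, PySem.List.index?, List.idxOf?, PySem.List.pyGet?, PySem.List.pyIdx?]

theorem asel_spec (g : Int → Int) (q : List Int) (hq : q ≠ []) :
    ∃ (i : Nat) (h : i < q.length),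
      asel g q = q[i] ∧ List.idxOf? ((PySem.List.min? (q.map g) (fun y => y)).getD 0) (q.map g) = some i := by
  obtain ⟨m, hm⟩ : ∃ m, PySem.List.min? (q.map g) (fun y => y) = some m := by
    cases h : PySem.List.min? (q.map g) (fun y => y) with
    | none => exact absurd (List.map_eq_nil_iff.mp ((PySem.List.min?_eq_none_iff _ _).mp h)) hq
    | some m => exact ⟨m, rfl⟩
  have hmem : m ∈ q.map g := PySem.List.min?_mem hm
  obtain ⟨i, hi⟩ := Option.isSome_iff_exists.mp (List.isSome_idxOf?.mpr hmem)
  obtain ⟨hlt, hgi, _⟩ := List.idxOf?_eq_some_iff.mp hi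
  have hlt' : i < q.length := by simpa using hlt
  refine ⟨i, hlt', ?_, by rw [hm]; simpa using hi⟩
  simp only [asel, if_neg hq, PySem.List.index?, hm, Option.getD_some]
  rw [hi]
  simp [PySem.List.pyGet?_natCast, List.getElem?_eq_getElem hlt']

theorem asel_mem (g : Int → Int) (q : List Int) (hq : q ≠ []) : asel g q ∈ q := by
  obtain ⟨i, h, he, -⟩ := asel_spec g q hq
  exact he ▸ List.getElem_mem h

theorem asel_append (g : Int → Int) (q : List Int) (j : Int) :
    asel g (q ++ [j]) =
      if q = [] then j
      else if g j < (PySem.List.min? (q.map g) (fun y => y)).getD 0 then j else asel g q := by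
  by_cases hq : q = []
  · subst hq; simpa using asel_singleton g j
  · rw [if_neg hq]
    obtain ⟨m, hm⟩ : ∃ m, PySem.List.min? (q.map g) (fun y => y) = some m := by
      cases h : PySem.List.min? (q.map g) (fun y => y) with
      | none => exact absurd (List.map_eq_nil_iff.mp ((PySem.List.min?_eq_none_iff _ _).mp h)) hq
      | some m => exact ⟨m, rfl⟩
    have hne : q ++ [j] ≠ [] := by simp
    have hmap : (q ++ [j]).map g = q.map g ++ [g j] := by simp
    have hmin : PySem.List.min? ((q ++ [j]).map g) (fun y => y) =
        some (if g j < m then g j else m) := by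
      rw [hmap, min?_append_singleton, hm]
    have hisMin : ∀ y ∈ q.map g, m ≤ y := PySem.List.min?_isMin hm
    by_cases hlt : g j < m
    · -- new element is the strict minimum: its first index is q.length, select j
      rw [if_pos (hm ▸ (by simpa using hlt))]
      have hidx : List.idxOf? (g j) ((q ++ [j]).map g) = some (q.map g).length := by
        rw [hmap]
        refine List.idxOf?_eq_some_iff.mpr ⟨by simp, by simp, ?_⟩
        intro k hk
        have hk' : k < (q.map g).length := by simpa using hk
        rw [List.getElem_append_left hk']
        have := hisMin (q.map g)[k] (List.getElem_mem hk')
        intro hcon; rw [hcon] at this; omega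
      simp only [asel, if_neg hne, PySem.List.index?, hmin, if_pos hlt, Option.getD_some, hidx]
      simp
    · -- minimum unchanged: first index of m is still inside q
      rw [if_neg (hm ▸ (by simpa using hlt))]
      obtain ⟨i, hilt, he, hidx⟩ := asel_spec g q hq
      rw [hm, Option.getD_some] at hidx
      obtain ⟨hlt2, hgi, hfirst⟩ := List.idxOf?_eq_some_iff.mp hidx
      have hidx' : List.idxOf? m ((q ++ [j]).map g) = some i := by
        rw [hmap]
        refine List.idxOf?_eq_some_iff.mpr ⟨by simp; omega, ?_, ?_⟩
        · rw [List.getElem_append_left hlt2]; exact hgi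
        · intro k hk
          rw [List.getElem_append_left (by omega)]
          exact hfirst k hk
      have hL : asel g (q ++ [j]) = (PySem.List.pyGet? (q ++ [j]) ((i : Nat) : Int)).getD 0 := by
        simp only [asel, if_neg hne, PySem.List.index?, hmin, if_neg hlt, Option.getD_some, hidx']
      rw [hL, PySem.List.pyGet?_natCast, List.getElem?_append_left hilt,
        List.getElem?_eq_getElem hilt, Option.getD_some]
      exact he.symm

-- B's running-best fold over a candidate list of nonnegative indices computes A's selection
-- (first index of the minimum) together with the minimum itself.
theorem bfold_eq (g : Int → Int) (q : List Int) (hq : ∀ x ∈ q, 0 ≤ x) :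
    q.foldl
      (fun (st : Int × Option Int) i =>
        if st.1 = -1 ∨ g i < st.2.getD 0 then (i, some (g i)) else st)
      ((-1 : Int), (none : Option Int))
    = (asel g q, PySem.List.min? (q.map g) (fun y => y)) := by
  induction q using List.reverseRecOn with
  | nil => simp [asel, PySem.List.min?]
  | append_singleton q j ih =>
    have hq' : ∀ x ∈ q, 0 ≤ x := fun x hx => hq x (by simp [hx])
    rw [List.foldl_append, ih hq']
    simp only [List.foldl_cons, List.foldl_nil]
    by_cases hqnil : q = []
    · subst hqnil
      simp [asel_nil, asel_singleton, PySem.List.min?]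
    · obtain ⟨m, hm⟩ : ∃ m, PySem.List.min? (q.map g) (fun y => y) = some m := by
        cases h : PySem.List.min? (q.map g) (fun y => y) with
        | none => exact absurd (List.map_eq_nil_iff.mp ((PySem.List.min?_eq_none_iff _ _).mp h)) hqnil
        | some m => exact ⟨m, rfl⟩
      have hnm1 : asel g q ≠ -1 := by
        have h0 := hq' _ (asel_mem g q hqnil)
        omega
      have hmap : (q ++ [j]).map g = q.map g ++ [g j] := by simp
      rw [asel_append, if_neg hqnil, hmap, min?_append_singleton, hm]
      simp only [Option.getD_some]
      by_cases hlt : g j < m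
      · rw [if_pos (Or.inr hlt)]
        simp [hlt]
      · rw [if_neg (by simp only [not_or]; exact ⟨hnm1, by simpa using hlt⟩)]
        simp [hlt]

-- the compare loop builds exactly pool.map g
theorem compare_eq_map (spaces pool : List Int) :
    (PySem.List.pyRange 0 (PySem.List.len pool)).foldl
      (fun c i2 => c ++ [(PySem.List.pyGet? spaces ((PySem.List.pyGet? pool i2).getD 0)).getD 0]) []
    = pool.map (fun jdx => (PySem.List.pyGet? spaces jdx).getD 0) := by
  rw [PySem.List.foldl_append_singleton_eq_map, List.nil_append]
  have : (fun i2 => (PySem.List.pyGet? spaces ((PySem.List.pyGet? pool i2).getD 0)).getD 0)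
      = (fun jdx => (PySem.List.pyGet? spaces jdx).getD 0) ∘ (fun i2 => PySem.List.pyGetD pool i2 0) := by
    funext i2; simp [PySem.List.pyGetD]
  rw [this, ← List.map_map, PySem.List.map_pyGetD_pyRange_zero]

theorem find_spec_aux (spaces : List Int) (stat : List Int) (n : Int) :
    find spaces stat n = find_alt spaces stat n := by
  simp only [find, find_alt]
  have hcong : ∀ (acc : List Int) (x : Int), x ∈ PySem.List.pyRange 0 (PySem.List.len stat) →
      (if (PySem.List.pyGet? stat x).getD 0 = 1 then
        if (PySem.List.pyGet? spaces x).getD 0 ≥ n then acc ++ [x] else acc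
      else acc)
      = (if (PySem.List.pyGet? stat x).getD 0 = 1 ∧ (PySem.List.pyGet? spaces x).getD 0 ≥ n then
          acc ++ [x] else acc) := by
    intro acc x _
    by_cases h1 : (PySem.List.pyGet? stat x).getD 0 = 1 <;>
      by_cases h2 : (PySem.List.pyGet? spaces x).getD 0 ≥ n <;> simp [h1, h2]
  rw [PySem.List.foldl_congr_mem _ _ _ _ hcong, PySem.List.foldl_append_ite_eq_filter, List.nil_append]
  rw [PySem.List.foldl_ite_eq_foldl_filter
    (p := fun i => (PySem.List.pyGet? stat i).getD 0 = 1 ∧ (PySem.List.pyGet? spaces i).getD 0 ≥ n)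
    (f := fun (st : Int × Option Int) i =>
      if st.1 = -1 ∨ (PySem.List.pyGet? spaces i).getD 0 < st.2.getD 0 then
        (i, some ((PySem.List.pyGet? spaces i).getD 0))
      else st)]
  have hnn : ∀ x ∈ (PySem.List.pyRange 0 (PySem.List.len stat)).filter
      (fun x => decide ((PySem.List.pyGet? stat x).getD 0 = 1 ∧ (PySem.List.pyGet? spaces x).getD 0 ≥ n)),
      0 ≤ x := by
    intro x hx
    have hx' := List.mem_of_mem_filter hx
    have := (PySem.List.mem_pyRange_one (a := 0) (b := PySem.List.len stat) (x := x)).mp hx'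
    omega
  rw [bfold_eq (fun i => (PySem.List.pyGet? spaces i).getD 0) _ hnn]
  by_cases hq : (PySem.List.pyRange 0 (PySem.List.len stat)).filter
      (fun x => decide ((PySem.List.pyGet? stat x).getD 0 = 1 ∧ (PySem.List.pyGet? spaces x).getD 0 ≥ n)) = []
  · rw [if_neg (not_not_intro hq), hq, asel_nil]
  · rw [if_pos hq, compare_eq_map]
    simp only [asel, if_neg hq]

-- ===== VERDICT (by name: the statement is the Claim_ definition above) =====
theorem find_spec : Claim_equal_find := by
  intro spaces stat n _ _
  unfold Spec_find
  exact find_spec_aux spaces stat n
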